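-- pv_equiv track=rewrite | github.com/mo124121/atcoder-activity | ARC135A.py | rec
-- ===== SOURCE A (Python) =====
-- MOD = 998244353
--
-- memo = {}
--
-- def rec(X):
--     if X in memo:
--         return memo[X]
--     if X <= 4:
--         memo[X] = X
--         return X
--     a = X // 2
--     b = X // 2 + X % 2
--     ret = rec(a) * rec(b) % MOD
--     memo[X] = ret
--     return ret
-- ===== SOURCE B (Python) =====
-- MOD = 998244353
--
-- def rec(X):
--     if X <= 4:
--         return X
--     # Level-by-level: the multiset of not-yet-split values always consists of
--     # two adjacent numbers v and v+1; keep only their multiplicities (c, d).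
--     v, c, d = X, 1, 0
--     while v > 4:
--         if v % 2 == 0:
--             v, c, d = v // 2, 2 * c + d, d
--         else:
--             v, c, d = v // 2, c, c + 2 * d
--     if v == 4:
--         # leaves: 4 (c times) and 5 -> 2*3 = 6 (d times)
--         return pow(4, c, MOD) * pow(6, d, MOD) % MOD
--     return pow(v, c, MOD) * pow(v + 1, d, MOD) % MOD
-- ===== Notes on version B (the rewrite author's own statement) =====
-- stated objective: alternative
-- what changed: Replaces the memoized top-down recursion with an iterative level-by-level pass that keeps only the multiplicities (c,d) of the two adjacent values v and v+1 present at each halving level, then combines leaf values with modular exponentiation.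
import Mathlib
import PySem

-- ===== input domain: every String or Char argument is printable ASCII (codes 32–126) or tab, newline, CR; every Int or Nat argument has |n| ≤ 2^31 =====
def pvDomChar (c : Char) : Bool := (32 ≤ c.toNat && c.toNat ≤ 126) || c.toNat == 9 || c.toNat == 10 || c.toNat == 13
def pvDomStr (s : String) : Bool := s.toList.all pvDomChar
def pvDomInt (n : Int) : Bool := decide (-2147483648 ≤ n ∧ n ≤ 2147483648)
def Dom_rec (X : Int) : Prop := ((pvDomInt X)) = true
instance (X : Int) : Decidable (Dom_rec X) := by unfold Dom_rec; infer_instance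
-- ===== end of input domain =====

-- B replaces the memoized binary recursion by an iterative level pass that keeps only the
-- multiplicities of the two adjacent values present at each level (objective: alternative).
-- A's module-level memo dict is a pure cache and does not affect return values.

-- ===== PORT A =====
-- literal transliteration of A's recursion (the memo is a value-transparent cache, omitted)
def rec (X : Int) : Int :=
  if X ≤ 4 then X
  else
    (rec (PySem.Int.floordiv X 2) *
     rec (PySem.Int.floordiv X 2 + PySem.Int.mod X 2)) % 998244353
termination_by X.toNat
decreasing_by
  all_goals
    simp only [PySem.Int.floordiv_eq_ediv_of_pos (a := X) (by omega : (0:Int) < 2),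
      PySem.Int.mod_eq_emod_of_pos (a := X) (by omega : (0:Int) < 2)]
    omega

-- ===== PORT B =====
-- the while loop of Source B; pow(a, e, MOD) is ported as a ^ e.toNat % MOD (e is always ≥ 0 here)
def recAltLoop (v c d : Int) : Int :=
  if v > 4 then
    if PySem.Int.mod v 2 = 0 then
      recAltLoop (PySem.Int.floordiv v 2) (2 * c + d) d
    else
      recAltLoop (PySem.Int.floordiv v 2) c (c + 2 * d)
  else if v = 4 then
    (4 : Int) ^ c.toNat % 998244353 * ((6 : Int) ^ d.toNat % 998244353) % 998244353
  else
    v ^ c.toNat % 998244353 * ((v + 1) ^ d.toNat % 998244353) % 998244353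
termination_by v.toNat
decreasing_by
  all_goals
    simp only [PySem.Int.floordiv_eq_ediv_of_pos (a := v) (by omega : (0:Int) < 2)]
    omega

def rec_alt (X : Int) : Int :=
  if X ≤ 4 then X
  else recAltLoop X 1 0

-- ===== PRECONDITION & SPEC =====
def Spec_rec (X : Int) (out : Int) : Prop := out = rec_alt X
instance (X : Int) (out : Int) : Decidable (Spec_rec X out) := by unfold Spec_rec; infer_instance

-- ===== CLAIM (what is proved, stated in full; the proofs are below) =====
def Claim_equal_rec : Prop := ∀ (X : Int), Dom_rec X → Spec_rec X (rec X)

-- ===== LEMMAS AND PROOFS =====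

lemma rec_unfold (X : Int) (h : ¬ X ≤ 4) :
    rec X = (rec (X / 2) * rec (X / 2 + X % 2)) % 998244353 := by
  rw [rec]
  simp only [if_neg h, PySem.Int.floordiv_eq_ediv_of_pos (a := X) (by omega : (0:Int) < 2),
    PySem.Int.mod_eq_emod_of_pos (a := X) (by omega : (0:Int) < 2)]

lemma rec_small (X : Int) (h : X ≤ 4) : rec X = X := by
  rw [rec]; simp [h]

lemma rec_five : rec 5 = 6 := by
  rw [rec_unfold 5 (by omega)]
  norm_num [rec_small 2 (by omega), rec_small 3 (by omega)]

-- main invariant: the loop computes (rec v)^c · (rec (v+1))^d  (mod 998244353)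
lemma loop_eq (n : Nat) : ∀ v c d : Int, v.toNat ≤ n → 2 ≤ v → 0 ≤ c → 0 ≤ d →
    recAltLoop v c d = (rec v) ^ c.toNat * (rec (v + 1)) ^ d.toNat % 998244353 := by
  induction n with
  | zero => intro v c d hn hv _ _; omega
  | succ n ih =>
    intro v c d hn hv hc hd
    rw [recAltLoop]
    by_cases h5 : v > 4
    · have hfl : PySem.Int.floordiv v 2 = v / 2 :=
        PySem.Int.floordiv_eq_ediv_of_pos (by omega)
      have hmd : PySem.Int.mod v 2 = v % 2 :=
        PySem.Int.mod_eq_emod_of_pos (by omega)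
      have hm2 : 2 ≤ v / 2 := by omega
      have hlt : (v / 2).toNat ≤ n := by omega
      simp only [if_pos h5, hfl, hmd]
      by_cases hev : v % 2 = 0
      · -- v even: v = 2m, v+1 = 2m+1
        have hveq : v / 2 * 2 = v := by omega
        have hA : rec v = (rec (v / 2) * rec (v / 2)) % 998244353 := by
          rw [rec_unfold v (by omega)]; rw [hev]; ring_nf
        have hB : rec (v + 1) = (rec (v / 2) * rec (v / 2 + 1)) % 998244353 := by
          rw [rec_unfold (v + 1) (by omega)]
          have h1 : (v + 1) / 2 = v / 2 := by omega
          have h2 : (v + 1) % 2 = 1 := by omega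
          rw [h1, h2]
        rw [if_pos hev, ih (v / 2) (2 * c + d) d hlt hm2 (by omega) hd]
        have hx : (2 * c + d).toNat = 2 * c.toNat + d.toNat := by omega
        rw [hx]
        apply Int.ModEq.eq ∘ Int.ModEq.symm
        calc (rec v) ^ c.toNat * (rec (v + 1)) ^ d.toNat
            ≡ ((rec (v/2) * rec (v/2)) ^ c.toNat) * ((rec (v/2) * rec (v/2 + 1)) ^ d.toNat)
              [ZMOD 998244353] := by
              exact Int.ModEq.mul
                (Int.ModEq.pow _ (by rw [hA]; exact (Int.emod_emod_of_dvd _ dvd_rfl)))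
                (Int.ModEq.pow _ (by rw [hB]; exact (Int.emod_emod_of_dvd _ dvd_rfl)))
          _ = rec (v/2) ^ (2 * c.toNat + d.toNat) * rec (v/2 + 1) ^ d.toNat := by ring
      · -- v odd: v = 2m+1, v+1 = 2m+2
        have hodd : v % 2 = 1 := by omega
        have hA : rec v = (rec (v / 2) * rec (v / 2 + 1)) % 998244353 := by
          rw [rec_unfold v (by omega), hodd]
        have hB : rec (v + 1) = (rec (v / 2 + 1) * rec (v / 2 + 1)) % 998244353 := by
          rw [rec_unfold (v + 1) (by omega)]
          have h1 : (v + 1) / 2 = v / 2 + 1 := by omega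
          have h2 : (v + 1) % 2 = 0 := by omega
          rw [h1, h2]; ring_nf
        rw [if_neg hev, ih (v / 2) c (c + 2 * d) hlt hm2 hc (by omega)]
        have hx : (c + 2 * d).toNat = c.toNat + 2 * d.toNat := by omega
        rw [hx]
        apply Int.ModEq.eq ∘ Int.ModEq.symm
        calc (rec v) ^ c.toNat * (rec (v + 1)) ^ d.toNat
            ≡ ((rec (v/2) * rec (v/2 + 1)) ^ c.toNat) * ((rec (v/2 + 1) * rec (v/2 + 1)) ^ d.toNat)
              [ZMOD 998244353] := by
              exact Int.ModEq.mul
                (Int.ModEq.pow _ (by rw [hA]; exact (Int.emod_emod_of_dvd _ dvd_rfl)))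
                (Int.ModEq.pow _ (by rw [hB]; exact (Int.emod_emod_of_dvd _ dvd_rfl)))
          _ = rec (v/2) ^ c.toNat * rec (v/2 + 1) ^ (c.toNat + 2 * d.toNat) := by ring
    · simp only [if_neg h5]
      by_cases h4 : v = 4
      · subst h4
        rw [if_pos rfl, rec_small 4 (by omega),
          (by norm_num : (4:Int) + 1 = 5), rec_five]
        exact (Int.mul_emod _ _ _).symm
      · rw [if_neg h4, rec_small v (by omega), rec_small (v + 1) (by omega)]
        exact (Int.mul_emod _ _ _).symm

-- ===== VERDICT (by name: the statement is the Claim_ definition above) =====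
theorem rec_spec : Claim_equal_rec := by
  intro X _
  unfold Spec_rec rec_alt
  by_cases h : X ≤ 4
  · rw [if_pos h, rec_small X h]
  · rw [if_neg h,
      loop_eq X.toNat X 1 0 (le_refl _) (by omega) (by omega) (by omega)]
    simp only [Int.toNat_one, Int.toNat_zero, pow_one, pow_zero, mul_one]
    rw [rec_unfold X h, Int.emod_emod_of_dvd _ dvd_rfl]
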